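-- pv_equiv track=rewrite | github.com/cenotelie/sapientia | sapientia/nlp/components/rel_heuristic/relation_extraction.py | extract_sentences_beginning_positions
-- ===== SOURCE A (Python) =====
-- def extract_sentences_beginning_positions(text):
--     """
--     Extract sentences beginning positions from a text
--     (used to extract sentences containing specific named entities)
--     :param text: text
--     :return:
--     """
--     sentences_beginning_pos = []
--     pos = 0
--     dot = False
--     end_of_sentence = False
--     for word in text:
--         if word == ".":
--             dot = True
--         if dot:
--             if word != ".":
--                 end_of_sentence = True
--             if end_of_sentence:
--                 sentences_beginning_pos.append(pos)
--                 dot = False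
--                 end_of_sentence = False
--         pos += 1
--     return sentences_beginning_pos
-- ===== SOURCE B (Python) =====
-- def extract_sentences_beginning_positions(text):
--     """
--     Extract sentences beginning positions from a text
--     (used to extract sentences containing specific named entities)
--     :param text: text
--     :return:
--     """
--     return [i for i, (prev, cur) in enumerate(zip(text, text[1:]), 1)
--             if prev == "." and cur != "."]
-- ===== Notes on version B (the rewrite author's own statement) =====
-- stated objective: simpler
-- what changed: Replaced the stateful dot/end_of_sentence flag machine with a stateless pairwise scan: a comprehension over enumerate(zip(text, text[1:]), 1) collecting each index whose previous char is '.' and whose own char is not.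
import Mathlib
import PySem

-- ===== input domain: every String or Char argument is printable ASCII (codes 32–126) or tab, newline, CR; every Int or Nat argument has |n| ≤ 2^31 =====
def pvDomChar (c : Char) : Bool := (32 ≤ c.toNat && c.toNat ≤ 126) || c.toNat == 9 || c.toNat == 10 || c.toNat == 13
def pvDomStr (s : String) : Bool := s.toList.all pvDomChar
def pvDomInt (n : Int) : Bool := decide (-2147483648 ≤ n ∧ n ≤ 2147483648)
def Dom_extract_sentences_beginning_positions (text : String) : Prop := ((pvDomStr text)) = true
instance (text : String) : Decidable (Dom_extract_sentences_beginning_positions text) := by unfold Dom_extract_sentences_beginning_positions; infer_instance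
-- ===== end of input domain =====

-- B replaces A's stateful dot/end_of_sentence flag machine with a stateless pairwise
-- scan over adjacent character pairs (objective: simpler).

-- ===== PORT A =====
-- one iteration of A's for-loop; state = (sentences_beginning_pos, pos, dot, end_of_sentence)
def pvStepA (st : List Int × Int × Bool × Bool) (word : Char) : List Int × Int × Bool × Bool :=
  let acc := st.1
  let pos := st.2.1
  let dot := st.2.2.1
  let eos := st.2.2.2
  let dot := if word == '.' then true else dot
  let res :=
    if dot then
      let eos := if word != '.' then true else eos
      if eos then (acc ++ [pos], false, false) else (acc, dot, eos)
    else (acc, dot, eos)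
  (res.1, pos + 1, res.2.1, res.2.2)

def extract_sentences_beginning_positions (text : String) : List Int :=
  (text.toList.foldl pvStepA ([], 0, false, false)).1

-- ===== PORT B =====
-- [i for i, (prev, cur) in enumerate(zip(text, text[1:]), 1) if prev == "." and cur != "."]
-- (text[1:] on a string is exactly List.drop 1 of its characters)
def extract_sentences_beginning_positions_alt (text : String) : List Int :=
  (PySem.List.enumerate (text.toList.zip (text.toList.drop 1)) 1).filterMap
    (fun p => if p.2.1 == '.' && p.2.2 != '.' then some p.1 else none)

-- ===== PRECONDITION & SPEC =====
def Spec_extract_sentences_beginning_positions (text : String) (out : List Int) : Prop := out = extract_sentences_beginning_positions_alt text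
instance (text : String) (out : List Int) : Decidable (Spec_extract_sentences_beginning_positions text out) := by unfold Spec_extract_sentences_beginning_positions; infer_instance

-- ===== CLAIM (what is proved, stated in full; the proofs are below) =====
def Claim_equal_extract_sentences_beginning_positions : Prop := ∀ (text : String), Dom_extract_sentences_beginning_positions text → Spec_extract_sentences_beginning_positions text (extract_sentences_beginning_positions text)

-- ===== LEMMAS AND PROOFS =====

-- Invariant of A's loop: entering an iteration, end_of_sentence is always false and the
-- dot flag equals "the previous character was '.'"; from such a state the loop appends
-- exactly the indices B collects from the adjacent pairs (p :: l).zip l.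
theorem pvFoldA_eq (l : List Char) : ∀ (acc : List Int) (p : Char) (n : Int),
    (l.foldl pvStepA (acc, n, p == '.', false)).1
      = acc ++ (PySem.List.enumerate ((p :: l).zip l) n).filterMap
          (fun q => if q.2.1 == '.' && q.2.2 != '.' then some q.1 else none) := by
  induction l with
  | nil => intro acc p n; simp
  | cons c r ih =>
    intro acc p n
    by_cases hc : c = '.'
    · subst hc
      have h1 : pvStepA (acc, n, p == '.', false) '.' = (acc, n + 1, ('.' == '.'), false) := by
        simp [pvStepA]
      rw [List.foldl_cons, h1, ih acc '.' (n + 1)]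
      simp [PySem.List.enumerate_cons]
    · by_cases hp : p = '.'
      · subst hp
        have h1 : pvStepA (acc, n, ('.' == '.'), false) c = (acc ++ [n], n + 1, (c == '.'), false) := by
          simp [pvStepA, hc]
        rw [List.foldl_cons, h1, ih (acc ++ [n]) c (n + 1)]
        simp [PySem.List.enumerate_cons, hc]
      · have h1 : pvStepA (acc, n, (p == '.'), false) c = (acc, n + 1, (c == '.'), false) := by
          simp [pvStepA, hc, hp]
        rw [List.foldl_cons, h1, ih acc c (n + 1)]
        simp [PySem.List.enumerate_cons, hc, hp]

-- ===== VERDICT (by name: the statement is the Claim_ definition above) =====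
theorem extract_sentences_beginning_positions_spec : Claim_equal_extract_sentences_beginning_positions := by
  intro text _
  unfold Spec_extract_sentences_beginning_positions
  unfold extract_sentences_beginning_positions extract_sentences_beginning_positions_alt
  cases hl : text.toList with
  | nil => simp
  | cons x r =>
    have h0 : pvStepA ([], 0, false, false) x = ([], 1, (x == '.'), false) := by
      by_cases hx : x = '.' <;> simp [pvStepA, hx]
    rw [List.foldl_cons, h0, pvFoldA_eq r [] x 1]
    simp
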